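-- pv_equiv track=rewrite | github.com/adammorrone/GaitTrack | GaitTrack.py | last_known_value
-- ===== SOURCE A (Python) =====
-- def last_known_value(arr):
--     value_found = False
--     k = len(arr) - 1
--     while not value_found and k > 0:
--         if arr[k] is not None:
--             break
--
--         k = k - 1
--
--     return arr[k]
-- ===== SOURCE B (Python) =====
-- def last_known_value(arr):
--     best = 0
--     for k in range(1, len(arr)):
--         if arr[k] is not None:
--             best = k
--     return arr[best]
-- ===== Notes on version B (the rewrite author's own statement) =====
-- stated objective: alternative
-- what changed: Replaces the backward while-loop with early exit by a forward single pass maintaining the index of the last non-None element (index 0 is never tested, preserving the arr[0] fallback).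
import Mathlib
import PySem

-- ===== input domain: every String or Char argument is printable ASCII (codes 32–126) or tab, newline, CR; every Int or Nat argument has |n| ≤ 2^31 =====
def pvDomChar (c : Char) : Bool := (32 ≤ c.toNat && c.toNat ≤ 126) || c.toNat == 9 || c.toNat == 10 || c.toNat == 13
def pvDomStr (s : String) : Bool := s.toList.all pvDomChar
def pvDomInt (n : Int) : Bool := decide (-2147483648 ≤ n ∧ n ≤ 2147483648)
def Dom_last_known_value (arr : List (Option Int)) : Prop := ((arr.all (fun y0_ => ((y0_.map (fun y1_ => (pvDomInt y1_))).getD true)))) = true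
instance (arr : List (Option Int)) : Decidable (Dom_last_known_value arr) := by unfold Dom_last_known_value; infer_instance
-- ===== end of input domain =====

-- B replaces A's backward while-loop (early exit at the last non-None index, never testing
-- index 0) by a forward single pass maintaining the index of the last non-None element.
-- Both raise IndexError on the empty list; Pre_ excludes it.

-- ===== PORT A =====
-- backward while-loop: k starts at len-1, decrements while arr[k] is None and k > 0
def lkvLoopA (arr : List (Option Int)) : Nat → Nat
  | 0 => 0
  | (k+1) =>
    if (PySem.List.pyGet? arr ((k : Int) + 1)).getD none ≠ none then k + 1
    else lkvLoopA arr k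

def last_known_value (arr : List (Option Int)) : Option Int :=
  let k := lkvLoopA arr (arr.length - 1)
  (PySem.List.pyGet? arr (k : Int)).getD none

-- ===== PORT B =====
def last_known_value_alt (arr : List (Option Int)) : Option Int :=
  let best := (PySem.List.pyRange 1 (arr.length : Int) 1).foldl
    (fun b k => if (PySem.List.pyGet? arr k).getD none ≠ none then k else b) 0
  (PySem.List.pyGet? arr best).getD none

-- ===== PRECONDITION & SPEC =====
-- Pre_ excludes exactly the empty list, on which Python A raises IndexError (arr[-1]).
def Pre_last_known_value (arr : List (Option Int)) : Prop := arr ≠ []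
instance (arr : List (Option Int)) : Decidable (Pre_last_known_value arr) := by
  unfold Pre_last_known_value; infer_instance

def pvWitness_last_known_value : List (Option Int) := [none, some 3, none]

def Spec_last_known_value (arr : List (Option Int)) (out : Option Int) : Prop := out = last_known_value_alt arr
instance (arr : List (Option Int)) (out : Option Int) : Decidable (Spec_last_known_value arr out) := by unfold Spec_last_known_value; infer_instance

-- ===== CLAIM (what is proved, stated in full; the proofs are below) =====
def Claim_equal_last_known_value : Prop := ∀ (arr : List (Option Int)), Dom_last_known_value arr → Pre_last_known_value arr → Spec_last_known_value arr (last_known_value arr)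

-- ===== LEMMAS AND PROOFS =====

-- B's forward fold over range(1, k+1) computes the same index as A's backward loop from k
theorem lkv_fold_eq (arr : List (Option Int)) (k : Nat) :
    (PySem.List.pyRange 1 ((k : Int) + 1) 1).foldl
      (fun b j => if (PySem.List.pyGet? arr j).getD none ≠ none then j else b) 0
      = ((lkvLoopA arr k : Nat) : Int) := by
  induction k with
  | zero => simp [PySem.List.pyRange_one_eq_nil, lkvLoopA]
  | succ k ih =>
    have h1 : (1 : Int) ≤ (k : Int) + 1 := by omega
    have h2 : ((k : Int) + 1) ≤ ((k : Int) + 1 + 1) := by omega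
    rw [show ((k + 1 : Nat) : Int) + 1 = ((k : Int) + 1) + 1 by push_cast; ring,
        PySem.List.pyRange_one_append 1 ((k : Int) + 1) (((k : Int) + 1) + 1) h1 h2,
        PySem.List.pyRange_one_singleton, List.foldl_append, ih]
    simp only [List.foldl_cons, List.foldl_nil, lkvLoopA]
    split_ifs with h
    · push_cast; ring
    · rfl

-- ===== VERDICT (by name: the statement is the Claim_ definition above) =====

theorem last_known_value_spec : Claim_equal_last_known_value := by
  intro arr _ hpre
  unfold Spec_last_known_value last_known_value last_known_value_alt
  obtain ⟨x, xs, rfl⟩ := List.exists_cons_of_ne_nil hpre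
  have hlen : (x :: xs).length = xs.length + 1 := by simp
  rw [hlen]
  have : ((xs.length + 1 : Nat) : Int) = (xs.length : Int) + 1 := by push_cast; ring
  rw [this, lkv_fold_eq (x :: xs) xs.length]
  simp
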